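-- pv_equiv track=rewrite | github.com/elebek01/CSC2053 | hw2.py | has123
-- ===== SOURCE A (Python) =====
-- def has123(nums):
--     """
--     Given an list of ints, return True if the sequence of numbers
--     1, 2, 3 appears in the list somewhere.
--     """
--     b = False
--     for i in range(len(nums)):
--         if nums[i] == 1:
--             try:
--                 if nums[i+1] == 2:
--                     try:
--                         if nums[i+2] == 3:
--                             b = True
--                     except:
--                         continue
--             except:
--                 continue
--     return b
-- ===== SOURCE B (Python) =====
-- def has123(nums):
--     """
--     Given an list of ints, return True if the sequence of numbers
--     1, 2, 3 appears in the list somewhere.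
--     """
--     # Single-pass finite-state machine: state = how many pattern elements
--     # (of 1,2,3) are matched by the current suffix; accept on completing 3.
--     state = 0
--     for x in nums:
--         if state == 2 and x == 3:
--             return True
--         if x == 1:
--             state = 1
--         elif state == 1 and x == 2:
--             state = 2
--         else:
--             state = 0
--     return False
-- ===== Notes on version B (the rewrite author's own statement) =====
-- stated objective: alternative
-- what changed: Replaced A's positional window checks (indexing i, i+1, i+2 with try/except) by a single-pass finite-state machine that maintains how much of the pattern 1,2,3 the current suffix matches and returns True on completing it.
import Mathlib
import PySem

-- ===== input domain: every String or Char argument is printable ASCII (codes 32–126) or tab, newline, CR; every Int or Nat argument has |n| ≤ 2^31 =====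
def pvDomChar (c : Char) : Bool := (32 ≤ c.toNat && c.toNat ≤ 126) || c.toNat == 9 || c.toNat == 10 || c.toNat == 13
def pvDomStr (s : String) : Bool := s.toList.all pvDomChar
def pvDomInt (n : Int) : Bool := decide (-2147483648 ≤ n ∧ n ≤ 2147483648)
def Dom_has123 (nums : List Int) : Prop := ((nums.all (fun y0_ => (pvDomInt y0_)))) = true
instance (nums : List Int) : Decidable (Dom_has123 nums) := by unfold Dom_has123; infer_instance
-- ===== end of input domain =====

-- B replaces A's indexed window checks (with try/except) by a single-pass
-- finite-state machine tracking the matched-so-far length of the pattern 1,2,3.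

-- ===== PORT A =====
-- literal port of A: loop over all indices, nested comparisons; an IndexError
-- at i+1 / i+2 (pyGet? = none) is caught by try/except and leaves b unchanged.
def has123 (nums : List Int) : Bool :=
  (PySem.List.pyRange 0 nums.length 1).foldl (fun b i =>
    if PySem.List.pyGet? nums i = some 1 then
      match PySem.List.pyGet? nums (i + 1) with
      | none => b
      | some v2 =>
        if v2 = 2 then
          match PySem.List.pyGet? nums (i + 2) with
          | none => b
          | some v3 => if v3 = 3 then true else b
        else b
    else b) false

-- ===== PORT B =====
-- state machine of Source B: state ∈ {0,1,2}; early return becomes `true` result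
def has123Go (st : Int) : List Int → Bool
  | [] => false
  | x :: xs =>
    if st = 2 ∧ x = 3 then true
    else if x = 1 then has123Go 1 xs
    else if st = 1 ∧ x = 2 then has123Go 2 xs
    else has123Go 0 xs

def has123_alt (nums : List Int) : Bool := has123Go 0 nums

-- ===== PRECONDITION & SPEC =====
def Spec_has123 (nums : List Int) (out : Bool) : Prop := out = has123_alt nums
instance (nums : List Int) (out : Bool) : Decidable (Spec_has123 nums out) := by unfold Spec_has123; infer_instance

-- ===== CLAIM (what is proved, stated in full; the proofs are below) =====
def Claim_equal_has123 : Prop := ∀ (nums : List Int), Dom_has123 nums → Spec_has123 nums (has123 nums)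

-- ===== LEMMAS AND PROOFS =====

-- "1,2,3 occurs starting at some index k"
def Occ123 (xs : List Int) : Prop :=
  ∃ k : Nat, xs[k]? = some 1 ∧ xs[k + 1]? = some 2 ∧ xs[k + 2]? = some 3

lemma occ_cons (x : Int) (xs : List Int) :
    Occ123 (x :: xs) ↔ (x = 1 ∧ xs[0]? = some 2 ∧ xs[1]? = some 3) ∨ Occ123 xs := by
  constructor
  · rintro ⟨k, h1, h2, h3⟩
    cases k with
    | zero => left; simp_all
    | succ k => right; exact ⟨k, by simpa using h1, by simpa using h2, by simpa using h3⟩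
  · rintro (⟨rfl, h2, h3⟩ | ⟨k, h1, h2, h3⟩)
    · exact ⟨0, by simp [h2, h3]⟩
    · exact ⟨k + 1, by simpa using h1, by simpa using h2, by simpa using h3⟩

-- characterisation of the state machine: what each state accepts
lemma go_char (xs : List Int) :
    (has123Go 0 xs = true ↔ Occ123 xs) ∧
    (has123Go 1 xs = true ↔ (Occ123 xs ∨ (xs[0]? = some 2 ∧ xs[1]? = some 3))) ∧
    (has123Go 2 xs = true ↔ (Occ123 xs ∨ xs[0]? = some 3)) := by
  induction xs with
  | nil => simp [has123Go, Occ123]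
  | cons x xs ih =>
    obtain ⟨ih0, ih1, ih2⟩ := ih
    refine ⟨?_, ?_, ?_⟩ <;>
      · simp only [has123Go, occ_cons]
        split_ifs with hA hB hC <;>
          simp_all; tauto

-- A's check at index i, as a predicate
def pA (nums : List Int) (i : Int) : Bool :=
  (PySem.List.pyGet? nums i == some 1) && (PySem.List.pyGet? nums (i + 1) == some 2) &&
    (PySem.List.pyGet? nums (i + 2) == some 3)

lemma stepA_eq (nums : List Int) :
    (fun (b : Bool) (i : Int) =>
      if PySem.List.pyGet? nums i = some 1 then
        match PySem.List.pyGet? nums (i + 1) with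
        | none => b
        | some v2 =>
          if v2 = 2 then
            match PySem.List.pyGet? nums (i + 2) with
            | none => b
            | some v3 => if v3 = 3 then true else b
          else b
      else b)
    = (fun b i => if pA nums i then true else b) := by
  funext b i
  simp only [pA]
  rcases Option.eq_none_or_eq_some (PySem.List.pyGet? nums (i + 1)) with h2 | ⟨v2, h2⟩ <;>
    rcases Option.eq_none_or_eq_some (PySem.List.pyGet? nums (i + 2)) with h3 | ⟨v3, h3⟩ <;>
    simp only [h2, h3] <;> split_ifs <;> simp_all

lemma hasA_any (nums : List Int) :
    has123 nums = (PySem.List.pyRange 0 nums.length 1).any (pA nums) := by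
  unfold has123
  rw [stepA_eq]
  have := PySem.List.foldl_if_true_eq (l := PySem.List.pyRange 0 nums.length 1)
      (p := pA nums) (b := false)
  simpa using this

lemma pA_char (nums : List Int) (k : Nat) :
    pA nums (k : Int) = true ↔
      (nums[k]? = some 1 ∧ nums[k + 1]? = some 2 ∧ nums[k + 2]? = some 3) := by
  have e1 : (k : Int) + 1 = ((k + 1 : Nat) : Int) := by push_cast; ring
  have e2 : (k : Int) + 2 = ((k + 2 : Nat) : Int) := by push_cast; ring
  simp only [pA, Bool.and_eq_true, beq_iff_eq, e1, e2, PySem.List.pyGet?_natCast, and_assoc]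

lemma hasA_occ (nums : List Int) : has123 nums = true ↔ Occ123 nums := by
  rw [hasA_any, List.any_eq_true]
  constructor
  · rintro ⟨i, hmem, hp⟩
    rw [PySem.List.mem_pyRange_one] at hmem
    obtain ⟨k, rfl⟩ : ∃ k : Nat, i = (k : Int) :=
      ⟨i.toNat, (Int.toNat_of_nonneg hmem.1).symm⟩
    exact ⟨k, (pA_char nums k).mp hp⟩
  · rintro ⟨k, h1, h2, h3⟩
    have hk : k < nums.length := (List.getElem?_eq_some_iff.mp h1).1
    refine ⟨(k : Int), ?_, (pA_char nums k).mpr ⟨h1, h2, h3⟩⟩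
    rw [PySem.List.mem_pyRange_one]
    constructor
    · positivity
    · omega

lemma bool_ext {x y : Bool} (h : x = true ↔ y = true) : x = y := by
  cases x <;> cases y <;> simp_all

-- ===== VERDICT (by name: the statement is the Claim_ definition above) =====
theorem has123_spec : Claim_equal_has123 := by
  intro nums _
  unfold Spec_has123 has123_alt
  apply bool_ext
  rw [hasA_occ]
  exact ((go_char nums).1).symm
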